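-- pv_equiv track=rewrite | github.com/LordMagusar/Python-Text-Based-BattleShips | main.py | coordChecker
-- ===== SOURCE A (Python) =====
-- def coordChecker(ships, coords):#checks a given list of coordinates in comparison to a players active ships. Returns True if one or more of the given coordinates is a conflict
-- 	flagged = False
-- 	for shipType in ships:
-- 		for coord in ships[shipType]:
-- 			if coord[0] in coords:
-- 				flagged = True
-- 				break
-- 		if flagged:
-- 			break
-- 	return flagged
-- ===== SOURCE B (Python) =====
-- def coordChecker(ships, coords):
--     firsts = sorted(coord[0] for shipType in ships for coord in ships[shipType])
--     cs = sorted(set(coords))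
--     i = j = 0
--     while i < len(firsts) and j < len(cs):
--         if firsts[i] == cs[j]:
--             return True
--         elif firsts[i] < cs[j]:
--             i += 1
--         else:
--             j += 1
--     return False
-- ===== Notes on version B (the rewrite author's own statement) =====
-- stated objective: alternative
-- what changed: Replaces the flag-and-break nested membership scan with sort-then-merge: both the ship coordinates' first elements and the deduplicated target coords are sorted once and a two-pointer merge walk detects a common element.
-- outside the precondition, e.g. on coordChecker({'A': [[1], []]}, [1]): A returns True, B raises IndexError
import Mathlib
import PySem

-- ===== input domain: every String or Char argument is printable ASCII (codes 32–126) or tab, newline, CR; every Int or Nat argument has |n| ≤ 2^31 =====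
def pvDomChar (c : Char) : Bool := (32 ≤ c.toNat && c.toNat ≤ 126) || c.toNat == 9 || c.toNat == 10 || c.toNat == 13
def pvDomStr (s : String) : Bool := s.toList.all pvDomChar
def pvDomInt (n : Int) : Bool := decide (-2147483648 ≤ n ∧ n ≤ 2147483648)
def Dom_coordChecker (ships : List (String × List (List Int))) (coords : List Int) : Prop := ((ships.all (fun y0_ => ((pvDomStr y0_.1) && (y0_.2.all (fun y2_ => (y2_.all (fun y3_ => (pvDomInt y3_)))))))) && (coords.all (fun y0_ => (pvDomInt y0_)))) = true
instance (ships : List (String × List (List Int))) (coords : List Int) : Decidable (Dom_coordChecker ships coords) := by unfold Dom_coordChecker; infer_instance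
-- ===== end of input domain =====

-- B sorts the ship coordinates' first elements and the deduplicated target coords once and
-- detects a conflict with a two-pointer merge walk, instead of A's flag-and-break nested
-- membership scan (objective: alternative algorithm, same result).


-- ===== PORT A =====
-- inner 'for coord in ships[shipType]' loop with its break; pyGet? none = IndexError (outside Pre_)
def pvAInner (coords : List Int) : List (List Int) → Bool
  | [] => false
  | c :: rest =>
    match PySem.List.pyGet? c 0 with
    | some x => if coords.contains x then true else pvAInner coords rest
    | none => false

def coordChecker (ships : List (String × List (List Int))) (coords : List Int) : Bool :=
  match ships with
  | [] => false
  | (_, lst) :: rest => if pvAInner coords lst then true else coordChecker rest coords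

-- ===== PORT B =====
-- two-pointer merge walk of Source B's while loop, as recursion on the two sorted lists
def pvMerge : List Int → List Int → Bool
  | [], _ => false
  | _ :: _, [] => false
  | x :: xs, y :: ys =>
    if x = y then true
    else if x < y then pvMerge xs (y :: ys)
    else pvMerge (x :: xs) ys

def coordChecker_alt (ships : List (String × List (List Int))) (coords : List Int) : Bool :=
  let firsts := PySem.List.sorted
    (ships.flatMap (fun p => p.2.filterMap (fun c => PySem.List.pyGet? c 0))) (fun x => x) false
  let cs := PySem.List.sorted (PySem.Set.ofList coords) (fun x => x) false
  pvMerge firsts cs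

-- ===== PRECONDITION & SPEC =====
-- Pre_ excludes ships containing an empty coordinate list: Python A raises IndexError on coord[0]
-- there unless short-circuiting hides it, and B's generator always raises on such input.
def Pre_coordChecker (ships : List (String × List (List Int))) (coords : List Int) : Prop :=
  (ships.all (fun p => p.2.all (fun c => !c.isEmpty))) = true
instance (ships : List (String × List (List Int))) (coords : List Int) : Decidable (Pre_coordChecker ships coords) := by unfold Pre_coordChecker; infer_instance

def pvWitness_coordChecker : (List (String × List (List Int))) × List Int :=
  ([("Destroyer", [[1, 2], [3]])], [3, 9])

def Spec_coordChecker (ships : List (String × List (List Int))) (coords : List Int) (out : Bool) : Prop := out = coordChecker_alt ships coords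
instance (ships : List (String × List (List Int))) (coords : List Int) (out : Bool) : Decidable (Spec_coordChecker ships coords out) := by unfold Spec_coordChecker; infer_instance

-- ===== CLAIM (what is proved, stated in full; the proofs are below) =====
def Claim_equal_coordChecker : Prop := ∀ (ships : List (String × List (List Int))) (coords : List Int), Dom_coordChecker ships coords → Pre_coordChecker ships coords → Spec_coordChecker ships coords (coordChecker ships coords)

-- ===== LEMMAS AND PROOFS =====
-- the list of first elements both sides are about
def pvFirsts (ships : List (String × List (List Int))) : List Int :=
  ships.flatMap (fun p => p.2.filterMap (fun c => PySem.List.pyGet? c 0))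

theorem pvAInner_eq (coords : List Int) (lst : List (List Int))
    (h : ∀ c ∈ lst, c ≠ []) :
    pvAInner coords lst
      = (lst.filterMap (fun c => PySem.List.pyGet? c 0)).any (fun x => coords.contains x) := by
  induction lst with
  | nil => rfl
  | cons c rest ih =>
    obtain ⟨a, c', rfl⟩ : ∃ a c', c = a :: c' := by
      cases c with
      | nil => exact absurd rfl (h _ (List.mem_cons_self))
      | cons a c' => exact ⟨a, c', rfl⟩
    have hrest := ih (fun d hd => h d (List.mem_cons_of_mem _ hd))
    have hget : PySem.List.pyGet? (a :: c') (0 : Int) = some a := by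
      simp [PySem.List.pyGet?, PySem.List.pyIdx?]
    by_cases ha : a ∈ coords
    · have hc : coords.contains a = true := by simpa using ha
      simp [pvAInner, hget, hc, List.filterMap_cons, hrest, ha]
    · have hc : coords.contains a = false := by simpa using ha
      simp [pvAInner, hget, hc, List.filterMap_cons, hrest, ha]

theorem coordChecker_eq' (ships : List (String × List (List Int))) (coords : List Int)
    (h : ∀ p ∈ ships, ∀ c ∈ p.2, c ≠ []) :
    coordChecker ships coords = (pvFirsts ships).any (fun x => coords.contains x) := by
  induction ships with
  | nil => rfl
  | cons p rest ih =>
    have hinner : ∀ c ∈ p.2, c ≠ [] := h p (List.mem_cons_self)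
    have ihr := ih (fun q hq => h q (List.mem_cons_of_mem _ hq))
    obtain ⟨s, lst⟩ := p
    rw [coordChecker, pvAInner_eq coords lst hinner]
    unfold pvFirsts
    rw [List.flatMap_cons, List.any_append]
    cases hb : (lst.filterMap (fun c => PySem.List.pyGet? c 0)).any (fun x => coords.contains x) <;>
      simp [ihr, pvFirsts, List.any_flatMap, List.any_filterMap]

theorem coordChecker_eq (ships : List (String × List (List Int))) (coords : List Int)
    (h : Pre_coordChecker ships coords) :
    coordChecker ships coords = (pvFirsts ships).any (fun x => coords.contains x) := by
  apply coordChecker_eq'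
  intro p hp c hc
  unfold Pre_coordChecker at h
  have := List.all_eq_true.mp (List.all_eq_true.mp h p hp) c hc
  simpa [List.isEmpty_iff] using this

-- the merge walk on two ≤-sorted lists detects exactly a common element
theorem pvMerge_iff (xs : List Int) : ∀ ys : List Int,
    xs.Pairwise (· ≤ ·) → ys.Pairwise (· ≤ ·) →
    (pvMerge xs ys = true ↔ ∃ v, v ∈ xs ∧ v ∈ ys) := by
  induction xs with
  | nil => intro ys _ _; simp [pvMerge]
  | cons x xs ihx =>
    intro ys
    induction ys with
    | nil => intro _ _; simp [pvMerge]
    | cons y ys ihy =>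
      intro hx hy
      have hx' := List.pairwise_cons.mp hx
      have hy' := List.pairwise_cons.mp hy
      by_cases hxy : x = y
      · subst hxy
        simp [pvMerge]
      · by_cases hlt : x < y
        · -- x < y and every element of ys is ≥ y, so x ∉ y :: ys: drop x
          rw [pvMerge]
          simp only [if_neg hxy, if_pos hlt]
          rw [ihx (y :: ys) hx'.2 hy]
          constructor
          · rintro ⟨v, hv1, hv2⟩; exact ⟨v, List.mem_cons_of_mem _ hv1, hv2⟩
          · rintro ⟨v, hv1, hv2⟩
            rcases List.mem_cons.mp hv1 with rfl | hv1'
            · rcases List.mem_cons.mp hv2 with rfl | hv2'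
              · exact absurd rfl hxy
              · exact absurd (lt_of_lt_of_le hlt (hy'.1 v hv2')) (lt_irrefl v)
            · exact ⟨v, hv1', hv2⟩
        · -- y < x and every element of xs is ≥ x, so y ∉ x :: xs: drop y
          have hyx : y < x := lt_of_le_of_ne (not_lt.mp hlt) (Ne.symm hxy)
          rw [pvMerge]
          simp only [if_neg hxy, if_neg hlt]
          rw [ihy hx hy'.2]
          constructor
          · rintro ⟨v, hv1, hv2⟩; exact ⟨v, hv1, List.mem_cons_of_mem _ hv2⟩
          · rintro ⟨v, hv1, hv2⟩
            rcases List.mem_cons.mp hv2 with rfl | hv2'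
            · rcases List.mem_cons.mp hv1 with rfl | hv1'
              · exact absurd rfl hxy
              · exact absurd (lt_of_lt_of_le hyx (hx'.1 v hv1')) (lt_irrefl v)
            · exact ⟨v, hv1, hv2'⟩

theorem coordChecker_alt_eq (ships : List (String × List (List Int))) (coords : List Int) :
    coordChecker_alt ships coords = (pvFirsts ships).any (fun x => coords.contains x) := by
  rw [Bool.eq_iff_iff]
  unfold coordChecker_alt
  rw [pvMerge_iff _ _ (PySem.List.sorted_pairwise _ _) (PySem.List.sorted_pairwise _ _)]
  simp only [PySem.List.mem_sorted, List.any_eq_true, List.contains_eq_mem, decide_eq_true_eq,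
    pvFirsts]
  constructor
  · rintro ⟨v, hv1, hv2⟩
    exact ⟨v, hv1, (PySem.Set.mem_ofList _ _).mp hv2⟩
  · rintro ⟨v, hv1, hv2⟩
    exact ⟨v, hv1, (PySem.Set.mem_ofList _ _).mpr hv2⟩

-- ===== VERDICT (by name: the statement is the Claim_ definition above) =====
theorem coordChecker_spec : Claim_equal_coordChecker := by
  intro ships coords _ hpre
  unfold Spec_coordChecker
  rw [coordChecker_eq ships coords hpre, coordChecker_alt_eq]
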